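-- pv_equiv track=rewrite | github.com/gumblex/googletest | googletest.py | generate_hostname
-- ===== SOURCE A (Python) =====
-- def generate_hostname(dnsnames):
--     wildcard = None
--     for name in dnsnames:
--         if name.startswith('*.'):
--             wildcard = name[1:]
--         elif '*' not in name:
--             return name
--     return 'www' + wildcard
-- ===== SOURCE B (Python) =====
-- def generate_hostname(dnsnames):
--     # pass 1: the first name without any '*' is A's early return
--     for name in dnsnames:
--         if '*' not in name:
--             return name
--     # pass 2: last '*.'-wildcard wins
--     wildcard = None
--     for name in dnsnames:
--         if name.startswith('*.'):
--             wildcard = name[1:]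
--     return 'www' + wildcard
-- ===== Notes on version B (the rewrite author's own statement) =====
-- stated objective: simpler
-- what changed: Replaces A's single loop with threaded Optional wildcard state by two independent passes: an early-return scan for the first '*'-free name, then a fold keeping the last '*.'-wildcard; Pre_ excludes lists with neither a plain name nor a '*.'-name, on which both A and B raise TypeError.
import Mathlib
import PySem

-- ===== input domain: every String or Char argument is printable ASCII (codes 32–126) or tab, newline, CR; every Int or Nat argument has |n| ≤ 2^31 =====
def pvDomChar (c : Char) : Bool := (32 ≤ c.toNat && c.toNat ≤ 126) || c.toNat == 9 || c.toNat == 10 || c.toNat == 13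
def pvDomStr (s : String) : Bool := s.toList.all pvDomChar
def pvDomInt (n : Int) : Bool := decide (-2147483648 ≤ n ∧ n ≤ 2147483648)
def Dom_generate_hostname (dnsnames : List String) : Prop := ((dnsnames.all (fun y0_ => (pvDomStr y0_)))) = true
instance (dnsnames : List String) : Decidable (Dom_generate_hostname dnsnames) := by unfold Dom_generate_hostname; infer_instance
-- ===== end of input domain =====

-- B replaces A's single loop with threaded wildcard state by two independent passes:
-- an early-return scan for the first '*'-free name, then a fold keeping the last '*.'-wildcard.


-- ===== PORT A =====
-- A's loop: carry wildcard : Option String; at the end 'www' + wildcard (none = TypeError, excluded by Pre_).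
def genA_go (wildcard : Option String) : List String → Option String
  | [] => wildcard.map (fun w => "www" ++ w)
  | name :: rest =>
    if PySem.Str.startswith name "*." then genA_go (some (PySem.Str.slice name (some 1) none)) rest
    else if PySem.Str.isIn "*" name then genA_go wildcard rest
    else some name

def generate_hostname (dnsnames : List String) : String :=
  (genA_go none dnsnames).getD ""

-- ===== PORT B =====
-- pass 1: first name without '*'
def genB_firstPlain : List String → Option String
  | [] => none
  | name :: rest => if PySem.Str.isIn "*" name then genB_firstPlain rest else some name

-- pass 2: last '*.'-wildcard (name[1:])
def genB_wild (dnsnames : List String) : Option String :=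
  dnsnames.foldl
    (fun w name => if PySem.Str.startswith name "*." then some (PySem.Str.slice name (some 1) none) else w)
    none

def generate_hostname_alt (dnsnames : List String) : String :=
  match genB_firstPlain dnsnames with
  | some name => name
  | none => ((genB_wild dnsnames).map (fun w => "www" ++ w)).getD ""

-- ===== PRECONDITION & SPEC =====
-- Pre_ excludes exactly the inputs where Python A raises TypeError ('www' + None):
-- lists containing neither a '*'-free name nor a name starting with '*.'.
def Pre_generate_hostname (dnsnames : List String) : Prop :=
  (∃ n ∈ dnsnames, PySem.Str.isIn "*" n = false) ∨
  (∃ n ∈ dnsnames, PySem.Str.startswith n "*." = true)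
instance (dnsnames : List String) : Decidable (Pre_generate_hostname dnsnames) := by
  unfold Pre_generate_hostname; infer_instance

def pvWitness_generate_hostname : List String := (["a.example.com"])

def Spec_generate_hostname (dnsnames : List String) (out : String) : Prop := out = generate_hostname_alt dnsnames
instance (dnsnames : List String) (out : String) : Decidable (Spec_generate_hostname dnsnames out) := by unfold Spec_generate_hostname; infer_instance

-- ===== CLAIM (what is proved, stated in full; the proofs are below) =====
def Claim_equal_generate_hostname : Prop := ∀ (dnsnames : List String), Dom_generate_hostname dnsnames → Pre_generate_hostname dnsnames → Spec_generate_hostname dnsnames (generate_hostname dnsnames)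

-- ===== LEMMAS AND PROOFS =====

-- a name starting with "*." contains "*"
lemma isIn_star_of_startswith (n : String) (h : PySem.Chars.startswith n.toList ['*', '.'] = true) :
    PySem.Chars.isIn ['*'] n.toList = true := by
  rw [PySem.Chars.isIn_iff_infix]
  have hp : ['*', '.'] <+: n.toList := (PySem.Chars.startswith_iff n.toList ['*', '.']).1 h
  exact (List.IsPrefix.isInfix (l₂ := ['*', '.']) (by decide)).trans hp.isInfix

-- core invariant: A's loop equals B's two passes, for every carried wildcard state
lemma go_eq (xs : List String) : ∀ (w : Option String),
    genA_go w xs =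
      match genB_firstPlain xs with
      | some name => some name
      | none =>
        ((xs.foldl
            (fun w name => if PySem.Str.startswith name "*." then some (PySem.Str.slice name (some 1) none) else w)
            w).map (fun s => "www" ++ s)) := by
  induction xs with
  | nil => intro w; simp [genA_go, genB_firstPlain]
  | cons name rest ih =>
    intro w
    by_cases hs : PySem.Chars.startswith name.toList ['*', '.'] = true
    · have hin := isIn_star_of_startswith name hs
      simp [genA_go, genB_firstPlain, hs, hin, ih]
    · by_cases hi : PySem.Chars.isIn ['*'] name.toList = true
      · simp [genA_go, genB_firstPlain, hs, hi, ih]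
      · simp [genA_go, genB_firstPlain, hs, hi]

-- ===== VERDICT (by name: the statement is the Claim_ definition above) =====
theorem generate_hostname_spec : Claim_equal_generate_hostname := by
  intro dnsnames _ _
  unfold Spec_generate_hostname generate_hostname generate_hostname_alt genB_wild
  rw [go_eq]
  cases genB_firstPlain dnsnames <;> simp
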